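-- pv_equiv track=rewrite | github.com/Justin-Riekehof/KIP | test.py | normalize_speaker_labels
-- ===== SOURCE A (Python) =====
-- def normalize_speaker_labels(speaker_text_sequence):
--     mapping = {}
--     next_id = 1
--     normalized = []
--
--     for item in speaker_text_sequence:
--         spk = item["speaker"]
--         if spk not in mapping:
--             mapping[spk] = f"Teilnehmer {next_id}"
--             next_id += 1
--
--         normalized.append({
--             "speaker": mapping[spk],
--             "text": item["text"],
--         })
--
--     return normalized
-- ===== SOURCE B (Python) =====
-- def normalize_speaker_labels(speaker_text_sequence):
--     # Stateless closed form: the label number of a speaker is the count of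
--     # distinct speakers in the prefix ending at that speaker's first occurrence.
--     # No mapping table and no counter are ever built.
--     speakers = [item["speaker"] for item in speaker_text_sequence]
--     return [{"speaker":
--                  f"Teilnehmer {len(set(speakers[:speakers.index(item['speaker']) + 1]))}",
--              "text": item["text"]}
--             for item in speaker_text_sequence]
-- ===== Notes on version B (the rewrite author's own statement) =====
-- stated objective: alternative
-- what changed: Replaces A's stateful single pass (incrementally grown dict plus next_id counter) by a stateless closed form evaluated per item: the label number equals the count of distinct speakers in the prefix ending at that speaker's first occurrence (len(set(speakers[:speakers.index(s)+1]))); no mapping or counter is ever built, trading O(n) for O(n^2).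
import Mathlib
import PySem

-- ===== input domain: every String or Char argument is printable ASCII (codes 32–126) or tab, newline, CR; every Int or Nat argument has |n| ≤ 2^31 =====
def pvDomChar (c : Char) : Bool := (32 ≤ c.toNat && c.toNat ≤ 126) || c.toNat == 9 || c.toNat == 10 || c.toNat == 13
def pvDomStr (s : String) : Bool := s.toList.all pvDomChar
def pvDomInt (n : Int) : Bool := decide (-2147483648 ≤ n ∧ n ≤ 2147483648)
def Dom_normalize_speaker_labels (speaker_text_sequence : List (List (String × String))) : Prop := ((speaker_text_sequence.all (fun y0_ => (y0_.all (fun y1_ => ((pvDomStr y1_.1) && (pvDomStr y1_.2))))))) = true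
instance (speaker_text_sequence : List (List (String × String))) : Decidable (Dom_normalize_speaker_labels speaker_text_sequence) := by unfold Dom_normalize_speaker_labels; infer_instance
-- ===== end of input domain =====

-- B replaces A's stateful pass (incrementally grown dict + counter) by a stateless closed form per
-- item: label number = count of distinct speakers in the prefix ending at the speaker's first
-- occurrence; no mapping is ever built (objective: alternative, O(n^2) instead of O(n)).

-- ===== PORT A =====
-- A's for-loop as structural recursion over the same state (mapping, next_id, normalized);
-- item["speaker"] / item["text"] are dict lookups (KeyError excluded by Pre_, totalised with getD "").
def normalize_speaker_labels_aux :
    List (List (String × String)) → PySem.Dict String String → Int →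
    List (List (String × String)) → List (List (String × String))
  | [], _, _, normalized => normalized
  | item :: rest, mapping, nextId, normalized =>
    let spk := (PySem.Dict.mk item).getD "speaker" ""
    if mapping.contains spk then
      normalize_speaker_labels_aux rest mapping nextId
        (normalized ++ [[("speaker", mapping.getD spk ""), ("text", (PySem.Dict.mk item).getD "text" "")]])
    else
      let mapping' := mapping.insert spk ("Teilnehmer " ++ PySem.Int.toStr nextId)
      normalize_speaker_labels_aux rest mapping' (nextId + 1)
        (normalized ++ [[("speaker", mapping'.getD spk ""), ("text", (PySem.Dict.mk item).getD "text" "")]])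

def normalize_speaker_labels (speaker_text_sequence : List (List (String × String))) : List (List (String × String)) :=
  normalize_speaker_labels_aux speaker_text_sequence PySem.Dict.empty 1 []

-- ===== PORT B =====
-- transliteration of Source B: speakers list, then one comprehension; label number =
-- len(set(speakers[:speakers.index(s)+1])).  speakers.index(s) cannot raise ValueError
-- (s is drawn from the very list), so the .getD 0 default is unreachable.
def normalize_speaker_labels_alt (speaker_text_sequence : List (List (String × String))) : List (List (String × String)) :=
  let speakers := speaker_text_sequence.map (fun item => (PySem.Dict.mk item).getD "speaker" "")
  speaker_text_sequence.map (fun item =>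
    let s := (PySem.Dict.mk item).getD "speaker" ""
    let i : Int := ((PySem.List.index? speakers s).getD 0 : Nat)
    [("speaker", "Teilnehmer " ++ PySem.Int.toStr
        ((PySem.Set.ofList (PySem.List.slice speakers none (some (i + 1)))).length : Int)),
     ("text", (PySem.Dict.mk item).getD "text" "")])

-- ===== PRECONDITION & SPEC =====
-- Pre_ excludes exactly the inputs where Python A raises KeyError: an item missing the "speaker" or "text" key.
def Pre_normalize_speaker_labels (speaker_text_sequence : List (List (String × String))) : Prop :=
  ∀ item ∈ speaker_text_sequence,
    (PySem.Dict.mk item).contains "speaker" = true ∧ (PySem.Dict.mk item).contains "text" = true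
instance (speaker_text_sequence : List (List (String × String))) : Decidable (Pre_normalize_speaker_labels speaker_text_sequence) := by unfold Pre_normalize_speaker_labels; infer_instance

def pvWitness_normalize_speaker_labels : (List (List (String × String))) :=
  [[("speaker", "Alice"), ("text", "Hallo")], [("speaker", "Bob"), ("text", "Hi")], [("speaker", "Alice"), ("text", "Na?")]]

def Spec_normalize_speaker_labels (speaker_text_sequence : List (List (String × String))) (out : List (List (String × String))) : Prop := out = normalize_speaker_labels_alt speaker_text_sequence
instance (speaker_text_sequence : List (List (String × String))) (out : List (List (String × String))) : Decidable (Spec_normalize_speaker_labels speaker_text_sequence out) := by unfold Spec_normalize_speaker_labels; infer_instance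

-- ===== CLAIM (what is proved, stated in full; the proofs are below) =====
def Claim_equal_normalize_speaker_labels : Prop := ∀ (speaker_text_sequence : List (List (String × String))), Dom_normalize_speaker_labels speaker_text_sequence → Pre_normalize_speaker_labels speaker_text_sequence → Spec_normalize_speaker_labels speaker_text_sequence (normalize_speaker_labels speaker_text_sequence)

-- ===== LEMMAS AND PROOFS =====

def pvSpk (item : List (String × String)) : String := (PySem.Dict.mk item).getD "speaker" ""
def pvTxt (item : List (String × String)) : String := (PySem.Dict.mk item).getD "text" ""
def pvLbl (n : Int) : String := "Teilnehmer " ++ PySem.Int.toStr n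

-- the label table holding seen[k] ↦ "Teilnehmer (k+1)"
def pvMk (seen : List String) : PySem.Dict String String :=
  PySem.Dict.mk ((PySem.List.enumerate seen 1).map (fun p => (p.2, pvLbl p.1)))

-- the output row for an item, labels read off the final dedup list L
def pvEntry (L : List String) (item : List (String × String)) : List (String × String) :=
  [("speaker", pvLbl ((L.idxOf (pvSpk item) : Int) + 1)), ("text", pvTxt item)]

lemma pvMk_keys (seen : List String) : (pvMk seen).keys = seen := by
  simp [pvMk, PySem.Dict.keys_mk, List.map_map, Function.comp_def]

lemma pvMk_contains (seen : List String) (s : String) :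
    (pvMk seen).contains s = true ↔ s ∈ seen := by
  rw [PySem.Dict.contains_iff_mem_keys, pvMk_keys]

lemma pvMk_getD (seen : List String) (hnd : seen.Nodup) {s : String} (hs : s ∈ seen) :
    (pvMk seen).getD s "" = pvLbl ((seen.idxOf s : Int) + 1) := by
  have hk : seen.idxOf s < seen.length := List.idxOf_lt_length_of_mem hs
  have hmem : ((1 + (seen.idxOf s : Int)), seen[seen.idxOf s]) ∈ PySem.List.enumerate seen 1 := by
    rw [PySem.List.mem_enumerate_iff]
    exact ⟨seen.idxOf s, hk, rfl⟩
  have hmem' : (s, pvLbl ((seen.idxOf s : Int) + 1)) ∈ (pvMk seen).items := by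
    have := List.mem_map_of_mem (f := fun p => (p.2, pvLbl p.1)) hmem
    simpa [pvMk, PySem.Dict.items, List.getElem_idxOf hk, add_comm] using this
  exact PySem.Dict.getD_of_mem_items _ hmem' (by rw [pvMk_keys]; exact hnd) ""

lemma pvMk_insert (seen : List String) {s : String} (hs : s ∉ seen) :
    (pvMk seen).insert s (pvLbl ((seen.length : Int) + 1)) = pvMk (seen ++ [s]) := by
  apply PySem.Dict.ext
  rw [PySem.Dict.items_insert_of_not_contains _ _ (by
        rw [Bool.eq_false_iff]; intro h; exact hs ((pvMk_contains seen s).mp h))]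
  simp [pvMk, PySem.List.enumerate_append, PySem.List.enumerate_cons,
    PySem.List.enumerate_nil, add_comm]

lemma pvUpdate_extends (xs : List String) : ∀ seen : List String,
    ∃ t, PySem.Set.update seen xs = seen ++ t := by
  induction xs with
  | nil => exact fun seen => ⟨[], by simp [PySem.Set.update]⟩
  | cons x xs ih =>
    intro seen
    have hstep : PySem.Set.update seen (x :: xs) = PySem.Set.update (PySem.Set.add seen x) xs := rfl
    by_cases hx : x ∈ seen
    · have : PySem.Set.add seen x = seen := by simp [PySem.Set.add, PySem.Set.contains, hx]
      rw [hstep, this]; exact ih seen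
    · have : PySem.Set.add seen x = seen ++ [x] := by simp [PySem.Set.add, PySem.Set.contains, hx]
      rw [hstep, this]
      obtain ⟨t, ht⟩ := ih (seen ++ [x])
      exact ⟨x :: t, by simpa using ht⟩

lemma pvIdxOf_update (xs : List String) (seen : List String) {s : String} (hs : s ∈ seen) :
    (PySem.Set.update seen xs).idxOf s = seen.idxOf s := by
  obtain ⟨t, ht⟩ := pvUpdate_extends xs seen
  rw [ht, List.idxOf_append, if_pos hs]

lemma pvAux_eq (seq : List (List (String × String))) :
    ∀ (seen : List String) (acc : List (List (String × String))), seen.Nodup →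
    normalize_speaker_labels_aux seq (pvMk seen) ((seen.length : Int) + 1) acc
      = acc ++ seq.map (pvEntry (PySem.Set.update seen (seq.map pvSpk))) := by
  induction seq with
  | nil => intro seen acc _; simp [normalize_speaker_labels_aux, PySem.Set.update]
  | cons item rest ih =>
    intro seen acc hnd
    have hspk : (PySem.Dict.mk item).getD "speaker" "" = pvSpk item := rfl
    have hupd : PySem.Set.update seen ((item :: rest).map pvSpk)
        = PySem.Set.update (PySem.Set.add seen (pvSpk item)) (rest.map pvSpk) := rfl
    by_cases hs : pvSpk item ∈ seen
    · have hadd : PySem.Set.add seen (pvSpk item) = seen := by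
        simp [PySem.Set.add, PySem.Set.contains, hs]
      have hc : (pvMk seen).contains (pvSpk item) = true := (pvMk_contains _ _).mpr hs
      rw [normalize_speaker_labels_aux, hspk]
      rw [if_pos hc, ih seen _ hnd, hupd, hadd]
      have hidx : (PySem.Set.update seen (rest.map pvSpk)).idxOf (pvSpk item) = seen.idxOf (pvSpk item) :=
        pvIdxOf_update _ _ hs
      simp [pvEntry, pvMk_getD seen hnd hs, pvTxt, hidx]
    · have hadd : PySem.Set.add seen (pvSpk item) = seen ++ [pvSpk item] := by
        simp [PySem.Set.add, PySem.Set.contains, hs]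
      have hc : ¬ (pvMk seen).contains (pvSpk item) = true := fun h => hs ((pvMk_contains _ _).mp h)
      rw [normalize_speaker_labels_aux, hspk]
      rw [if_neg hc]
      have hins : (pvMk seen).insert (pvSpk item) ("Teilnehmer " ++ PySem.Int.toStr ((seen.length : Int) + 1))
          = pvMk (seen ++ [pvSpk item]) := pvMk_insert seen hs
      have hnd' : (seen ++ [pvSpk item]).Nodup := by
        simp [List.nodup_append, hnd]
        intro a ha h; exact hs (h ▸ ha)
      have hlen : ((seen.length : Int) + 1) + 1 = (((seen ++ [pvSpk item]).length : Int) + 1) := by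
        simp only [List.length_append, List.length_cons, List.length_nil]; push_cast; ring
      rw [hins, hlen, ih (seen ++ [pvSpk item]) _ hnd', hupd, hadd]
      have hsmem : pvSpk item ∈ seen ++ [pvSpk item] := by simp
      have hidx : (PySem.Set.update (seen ++ [pvSpk item]) (rest.map pvSpk)).idxOf (pvSpk item)
          = (seen ++ [pvSpk item]).idxOf (pvSpk item) := pvIdxOf_update _ _ hsmem
      have hidx2 : (seen ++ [pvSpk item]).idxOf (pvSpk item) = seen.length := by
        rw [List.idxOf_append, if_neg hs]; simp
      simp [pvEntry, pvMk_getD _ hnd' hsmem, pvTxt, hidx, hidx2]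

-- set(prefix-up-through-first-occurrence) has exactly rank-in-first-appearance-order elements
lemma pvRank_eq (spk : List String) (s : String) (k : Nat)
    (h : PySem.List.index? spk s = some k) :
    (PySem.Set.ofList (spk.take (k + 1))).length
      = (PySem.Set.ofList spk).idxOf s + 1 := by
  obtain ⟨pre, suf, hsplit, hlen, hnotin⟩ := (PySem.List.index?_eq_some_iff _ _ _).mp h
  subst hsplit
  have hnotin' : s ∉ PySem.Set.ofList pre := fun hx =>
    hnotin ((PySem.Set.mem_ofList _ _).mp hx)
  have htake : (pre ++ s :: suf).take (k + 1) = pre ++ [s] := by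
    rw [List.take_append]
    simp [hlen]
  have hofl1 : PySem.Set.ofList (pre ++ [s]) = PySem.Set.ofList pre ++ [s] := by
    rw [PySem.Set.ofList_eq_foldl, List.foldl_append, ← PySem.Set.ofList_eq_foldl]
    simp [PySem.Set.add, PySem.Set.contains, hnotin']
  have hofl2 : ∃ t, PySem.Set.ofList (pre ++ s :: suf)
      = (PySem.Set.ofList pre ++ [s]) ++ t := by
    have hsp : pre ++ s :: suf = (pre ++ [s]) ++ suf := by simp
    rw [hsp, PySem.Set.ofList_eq_foldl, List.foldl_append, ← PySem.Set.ofList_eq_foldl, hofl1]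
    exact pvUpdate_extends _ _
  obtain ⟨t, ht⟩ := hofl2
  rw [htake, hofl1, ht, List.idxOf_append, if_pos (by simp), List.idxOf_append, if_neg hnotin']
  simp

lemma pvAlt_eq (seq : List (List (String × String))) :
    normalize_speaker_labels_alt seq = seq.map (pvEntry (PySem.List.dedup (seq.map pvSpk))) := by
  unfold normalize_speaker_labels_alt
  apply List.map_congr_left
  intro item hitem
  have hmem : pvSpk item ∈ seq.map pvSpk := List.mem_map_of_mem hitem
  set spk := seq.map pvSpk with hspk
  have hsome : (PySem.List.index? spk (pvSpk item)).isSome := by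
    rw [PySem.List.index?_isSome_iff]; exact hmem
  obtain ⟨k, hk⟩ := Option.isSome_iff_exists.mp hsome
  have hslice : PySem.List.slice spk none (some (((k : Nat) : Int) + 1))
      = spk.take (k + 1) := by
    have hc : (((k : Nat) : Int) + 1) = (((k + 1 : Nat)) : Int) := by push_cast; ring
    rw [hc, PySem.List.slice_to_natCast]
  have hidxL : (PySem.List.dedup spk).idxOf (pvSpk item) = (PySem.Set.ofList spk).idxOf (pvSpk item) := by
    rw [PySem.List.dedup_eq_ofList]
  show (let s := (PySem.Dict.mk item).getD "speaker" ""
        let i : Int := ((PySem.List.index? spk s).getD 0 : Nat)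
        [("speaker", "Teilnehmer " ++ PySem.Int.toStr
            ((PySem.Set.ofList (PySem.List.slice spk none (some (i + 1)))).length : Int)),
         ("text", (PySem.Dict.mk item).getD "text" "")])
    = pvEntry (PySem.List.dedup spk) item
  have hsp : (PySem.Dict.mk item).getD "speaker" "" = pvSpk item := rfl
  simp only [pvEntry, pvTxt, pvLbl, hsp, hk, Option.getD_some, hslice,
    pvRank_eq spk (pvSpk item) k hk, hidxL]
  push_cast
  rfl

lemma pvEqual (seq : List (List (String × String))) :
    normalize_speaker_labels seq = normalize_speaker_labels_alt seq := by
  have h0 : normalize_speaker_labels seq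
      = normalize_speaker_labels_aux seq (pvMk []) ((([] : List String).length : Int) + 1) [] := rfl
  rw [h0, pvAux_eq seq [] [] List.nodup_nil, pvAlt_eq]
  have : PySem.Set.update ([] : List String) (seq.map pvSpk) = PySem.List.dedup (seq.map pvSpk) := by
    rw [PySem.List.dedup_eq_ofList, PySem.Set.ofList_eq_foldl]; rfl
  rw [this]; simp

-- ===== VERDICT (by name: the statement is the Claim_ definition above) =====
theorem normalize_speaker_labels_spec : Claim_equal_normalize_speaker_labels := by
  intro seq _ _
  unfold Spec_normalize_speaker_labels
  exact pvEqual seq
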